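-- pv_equiv track=rewrite | github.com/eufrat987/daily-alg-task | 11.21/minimum-removals-for-valid-parenthesis.py | count_invalid_parenthesis
-- ===== SOURCE A (Python) =====
-- def count_invalid_parenthesis(string):
--     op ,cp = 0, 0
--     rp = 0
--     for s in string:
--         if s == '(': op += 1
--         elif s == ')' and op > cp: cp += 1
--         else: rp += 1
--     return op - cp + rp
-- ===== SOURCE B (Python) =====
-- def count_invalid_parenthesis(string):
--     # forward scan: count unmatched closing parens and non-paren chars
--     bal = 0
--     bad_close = 0
--     others = 0
--     for c in string:
--         if c == '(':
--             bal += 1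
--         elif c == ')':
--             if bal > 0:
--                 bal -= 1
--             else:
--                 bad_close += 1
--         else:
--             others += 1
--     # backward scan: count unmatched opening parens
--     bal = 0
--     bad_open = 0
--     for c in reversed(string):
--         if c == ')':
--             bal += 1
--         elif c == '(':
--             if bal > 0:
--                 bal -= 1
--             else:
--                 bad_open += 1
--     return bad_close + bad_open + others
-- ===== Notes on version B (the rewrite author's own statement) =====
-- stated objective: alternative
-- what changed: Replaces A's single pass tracking (total opens, matched closes, everything else) by two symmetric greedy passes: a forward scan counting unmatched closing parens plus non-paren characters, and a backward scan counting unmatched opening parens, returning their sum.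
import Mathlib
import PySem

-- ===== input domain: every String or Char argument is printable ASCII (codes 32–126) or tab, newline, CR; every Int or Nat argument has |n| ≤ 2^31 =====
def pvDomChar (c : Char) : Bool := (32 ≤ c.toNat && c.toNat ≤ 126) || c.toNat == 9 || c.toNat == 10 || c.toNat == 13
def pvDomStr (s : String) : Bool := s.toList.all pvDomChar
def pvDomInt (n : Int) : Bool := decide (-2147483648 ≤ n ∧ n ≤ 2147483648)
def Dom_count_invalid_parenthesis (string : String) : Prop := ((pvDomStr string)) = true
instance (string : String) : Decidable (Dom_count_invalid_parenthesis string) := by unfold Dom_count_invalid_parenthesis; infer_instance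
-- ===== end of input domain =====

-- B changes the decomposition: two symmetric greedy passes (unmatched closing parens forward,
-- unmatched opening parens backward, plus non-paren chars) instead of A's single (opens, matched, rest) pass.

-- ===== PORT A =====
-- A's loop state (op, cp, rp), one step per character, branches in A's order.
def pvAStep (s : Int × Int × Int) (c : Char) : Int × Int × Int :=
  if c = '(' then (s.1 + 1, s.2.1, s.2.2)
  else if c = ')' ∧ s.1 > s.2.1 then (s.1, s.2.1 + 1, s.2.2)
  else (s.1, s.2.1, s.2.2 + 1)

def count_invalid_parenthesis (string : String) : Int :=
  let r := string.toList.foldl pvAStep (0, 0, 0)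
  r.1 - r.2.1 + r.2.2

-- ===== PORT B =====
-- left pass state (bal, bad_close, others)
def pvLStep (s : Int × Int × Int) (c : Char) : Int × Int × Int :=
  if c = '(' then (s.1 + 1, s.2.1, s.2.2)
  else if c = ')' then
    (if s.1 > 0 then (s.1 - 1, s.2.1, s.2.2) else (s.1, s.2.1 + 1, s.2.2))
  else (s.1, s.2.1, s.2.2 + 1)

-- right pass state (bal, bad_open)
def pvRStep (s : Int × Int) (c : Char) : Int × Int :=
  if c = ')' then (s.1 + 1, s.2)
  else if c = '(' then
    (if s.1 > 0 then (s.1 - 1, s.2) else (s.1, s.2 + 1))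
  else s

def count_invalid_parenthesis_alt (string : String) : Int :=
  let l := string.toList.foldl pvLStep (0, 0, 0)
  let r := string.toList.reverse.foldl pvRStep (0, 0)
  l.2.1 + r.2 + l.2.2

-- ===== PRECONDITION & SPEC =====
def Spec_count_invalid_parenthesis (string : String) (out : Int) : Prop := out = count_invalid_parenthesis_alt string
instance (string : String) (out : Int) : Decidable (Spec_count_invalid_parenthesis string out) := by unfold Spec_count_invalid_parenthesis; infer_instance

-- ===== CLAIM (what is proved, stated in full; the proofs are below) =====
def Claim_equal_count_invalid_parenthesis : Prop := ∀ (string : String), Dom_count_invalid_parenthesis string → Spec_count_invalid_parenthesis string (count_invalid_parenthesis string)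

-- ===== LEMMAS AND PROOFS =====

-- from-zero results of B's left pass, the reference quantities of the proof
def pvOz (xs : List Char) : Int := (xs.foldl pvLStep (0, 0, 0)).1
def pvCz (xs : List Char) : Int := (xs.foldl pvLStep (0, 0, 0)).2.1
def pvTz (xs : List Char) : Int := (xs.foldl pvLStep (0, 0, 0)).2.2

-- invariant of B's left fold: the balance stays nonnegative
theorem pvL_inv (xs : List Char) : ∀ (b bc ot : Int), 0 ≤ b →
    0 ≤ (xs.foldl pvLStep (b, bc, ot)).1 ∧ bc ≤ (xs.foldl pvLStep (b, bc, ot)).2.1 := by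
  induction xs with
  | nil => intro b bc ot hb; simp only [List.foldl_nil]; exact ⟨hb, le_refl bc⟩
  | cons c t ih =>
    intro b bc ot hb
    by_cases hc1 : c = '('
    · subst hc1
      have sb : List.foldl pvLStep (b, bc, ot) ('(' :: t)
          = List.foldl pvLStep (b + 1, bc, ot) t := by simp [pvLStep]
      rw [sb]; exact ih _ _ _ (by omega)
    · by_cases hc2 : c = ')'
      · subst hc2
        by_cases hbp : b > 0
        · have sb : List.foldl pvLStep (b, bc, ot) (')' :: t)
              = List.foldl pvLStep (b - 1, bc, ot) t := by simp [pvLStep, hbp]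
          rw [sb]; exact ih _ _ _ (by omega)
        · have sb : List.foldl pvLStep (b, bc, ot) (')' :: t)
              = List.foldl pvLStep (b, bc + 1, ot) t := by simp [pvLStep, hbp]
          rw [sb]
          obtain ⟨h1, h2⟩ := ih b (bc + 1) ot hb
          exact ⟨h1, by omega⟩
      · have sb : List.foldl pvLStep (b, bc, ot) (c :: t)
            = List.foldl pvLStep (b, bc, ot + 1) t := by simp [pvLStep, hc1, hc2]
        rw [sb]; exact ih _ _ _ hb

theorem pvOz_nonneg (xs : List Char) : 0 ≤ pvOz xs := (pvL_inv xs 0 0 0 (le_refl 0)).1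
theorem pvCz_nonneg (xs : List Char) : 0 ≤ pvCz xs := (pvL_inv xs 0 0 0 (le_refl 0)).2

-- A's fold tracked against B's left fold: op - cp is B's balance, rp is bad_close + others
theorem pvAB (xs : List Char) : ∀ (op cp rp bal bc ot : Int),
    op - cp = bal → rp = bc + ot →
    (xs.foldl pvAStep (op, cp, rp)).1 - (xs.foldl pvAStep (op, cp, rp)).2.1
      = (xs.foldl pvLStep (bal, bc, ot)).1 ∧
    (xs.foldl pvAStep (op, cp, rp)).2.2
      = (xs.foldl pvLStep (bal, bc, ot)).2.1 + (xs.foldl pvLStep (bal, bc, ot)).2.2 := by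
  induction xs with
  | nil =>
    intro op cp rp bal bc ot h1 h2
    simp only [List.foldl_nil]
    exact ⟨by omega, by omega⟩
  | cons c t ih =>
    intro op cp rp bal bc ot h1 h2
    simp only [List.foldl_cons, pvAStep, pvLStep]
    by_cases hc1 : c = '('
    · simp [hc1]; exact ih _ _ _ _ _ _ (by omega) (by omega)
    · by_cases hc2 : c = ')'
      · by_cases hb : bal > 0
        · have hop : op > cp := by omega
          simp [hc2, hb, hop]
          exact ih _ _ _ _ _ _ (by omega) (by omega)
        · have hop : ¬ op > cp := by omega
          simp [hc2, hb, hop]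
          exact ih _ _ _ _ _ _ (by omega) (by omega)
      · simp [hc1, hc2]
        exact ih _ _ _ _ _ _ (by omega) (by omega)

-- shift law: B's left fold from an arbitrary nonnegative balance, via the from-zero results
theorem pvLShift (xs : List Char) : ∀ (b bc ot : Int), 0 ≤ b →
    xs.foldl pvLStep (b, bc, ot)
      = (pvOz xs + max (b - pvCz xs) 0, bc + max (pvCz xs - b) 0, ot + pvTz xs) := by
  induction xs with
  | nil =>
    intro b bc ot hb
    simp only [List.foldl_nil, pvOz, pvCz, pvTz, List.foldl_nil, Prod.mk.injEq]
    refine ⟨?_, ?_, ?_⟩ <;> first | omega | ((simp only [max_def]; try split_ifs) <;> omega)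
  | cons c t ih =>
    intro b bc ot hb
    have hCN : 0 ≤ pvCz t := pvCz_nonneg t
    by_cases hc1 : c = '('
    · subst hc1
      have s0 : List.foldl pvLStep (0, 0, 0) ('(' :: t) = List.foldl pvLStep (1, 0, 0) t := by
        simp [pvLStep]
      have sb : List.foldl pvLStep (b, bc, ot) ('(' :: t)
          = List.foldl pvLStep (b + 1, bc, ot) t := by simp [pvLStep]
      have e0 := ih 1 0 0 (by omega)
      have hO : pvOz ('(' :: t) = pvOz t + max (1 - pvCz t) 0 := by
        show (List.foldl pvLStep (0, 0, 0) ('(' :: t)).1 = _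
        rw [s0, e0]
      have hC : pvCz ('(' :: t) = max (pvCz t - 1) 0 := by
        show (List.foldl pvLStep (0, 0, 0) ('(' :: t)).2.1 = _
        rw [s0, e0]; first | rfl | (dsimp only; first | rfl | omega | ((simp only [max_def]; try split_ifs) <;> omega))
      have hT : pvTz ('(' :: t) = pvTz t := by
        show (List.foldl pvLStep (0, 0, 0) ('(' :: t)).2.2 = _
        rw [s0, e0]; first | rfl | (dsimp only; first | rfl | omega | ((simp only [max_def]; try split_ifs) <;> omega))
      rw [sb, ih (b + 1) bc ot (by omega), hO, hC, hT]
      clear ih e0 s0 sb hO hC hT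
      generalize pvOz t = O
      generalize pvCz t = C at hCN ⊢
      generalize pvTz t = T
      simp only [Prod.mk.injEq]
      refine ⟨?_, ?_, ?_⟩ <;> first | omega | ((simp only [max_def]; try split_ifs) <;> omega)
    · by_cases hc2 : c = ')'
      · subst hc2
        have s0 : List.foldl pvLStep (0, 0, 0) (')' :: t) = List.foldl pvLStep (0, 1, 0) t := by
          simp [pvLStep]
        have e0 := ih 0 1 0 (le_refl 0)
        have hO : pvOz (')' :: t) = pvOz t := by
          show (List.foldl pvLStep (0, 0, 0) (')' :: t)).1 = _
          rw [s0, e0]; first | rfl | (dsimp only; first | rfl | omega | ((simp only [max_def]; try split_ifs) <;> omega))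
        have hC : pvCz (')' :: t) = pvCz t + 1 := by
          show (List.foldl pvLStep (0, 0, 0) (')' :: t)).2.1 = _
          rw [s0, e0]; first | rfl | (dsimp only; first | rfl | omega | ((simp only [max_def]; try split_ifs) <;> omega))
        have hT : pvTz (')' :: t) = pvTz t := by
          show (List.foldl pvLStep (0, 0, 0) (')' :: t)).2.2 = _
          rw [s0, e0]; first | rfl | (dsimp only; first | rfl | omega | ((simp only [max_def]; try split_ifs) <;> omega))
        by_cases hbp : b > 0
        · have sb : List.foldl pvLStep (b, bc, ot) (')' :: t)
              = List.foldl pvLStep (b - 1, bc, ot) t := by simp [pvLStep, hbp]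
          rw [sb, ih (b - 1) bc ot (by omega), hO, hC, hT]
          clear ih e0 s0 sb hO hC hT
          generalize pvOz t = O
          generalize pvCz t = C at hCN ⊢
          generalize pvTz t = T
          simp only [Prod.mk.injEq]
          refine ⟨?_, ?_, ?_⟩ <;> first | omega | ((simp only [max_def]; try split_ifs) <;> omega)
        · have sb : List.foldl pvLStep (b, bc, ot) (')' :: t)
              = List.foldl pvLStep (b, bc + 1, ot) t := by simp [pvLStep, hbp]
          rw [sb, ih b (bc + 1) ot hb, hO, hC, hT]
          clear ih e0 s0 sb hO hC hT
          generalize pvOz t = O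
          generalize pvCz t = C at hCN ⊢
          generalize pvTz t = T
          simp only [Prod.mk.injEq]
          refine ⟨?_, ?_, ?_⟩ <;> first | omega | ((simp only [max_def]; try split_ifs) <;> omega)
      · have s0 : List.foldl pvLStep (0, 0, 0) (c :: t) = List.foldl pvLStep (0, 0, 1) t := by
          simp [pvLStep, hc1, hc2]
        have sb : List.foldl pvLStep (b, bc, ot) (c :: t)
            = List.foldl pvLStep (b, bc, ot + 1) t := by simp [pvLStep, hc1, hc2]
        have e0 := ih 0 0 1 (le_refl 0)
        have hO : pvOz (c :: t) = pvOz t := by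
          show (List.foldl pvLStep (0, 0, 0) (c :: t)).1 = _
          rw [s0, e0]; first | rfl | (dsimp only; first | rfl | omega | ((simp only [max_def]; try split_ifs) <;> omega))
        have hC : pvCz (c :: t) = pvCz t := by
          show (List.foldl pvLStep (0, 0, 0) (c :: t)).2.1 = _
          rw [s0, e0]; first | rfl | (dsimp only; first | rfl | omega | ((simp only [max_def]; try split_ifs) <;> omega))
        have hT : pvTz (c :: t) = pvTz t + 1 := by
          show (List.foldl pvLStep (0, 0, 0) (c :: t)).2.2 = _
          rw [s0, e0]; first | rfl | (dsimp only; first | rfl | omega | ((simp only [max_def]; try split_ifs) <;> omega))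
        rw [sb, ih b bc (ot + 1) hb, hO, hC, hT]
        clear ih e0 s0 sb hO hC hT
        generalize pvOz t = O
        generalize pvCz t = C at hCN ⊢
        generalize pvTz t = T
        simp only [Prod.mk.injEq]
        refine ⟨?_, ?_, ?_⟩ <;> first | omega | ((simp only [max_def]; try split_ifs) <;> omega)

-- B's right pass over the reversed list, characterised by the same from-zero quantities
theorem pvR (xs : List Char) : ∀ (r bo : Int), 0 ≤ r →
    xs.reverse.foldl pvRStep (r, bo)
      = (pvCz xs + max (r - pvOz xs) 0, bo + max (pvOz xs - r) 0) := by
  induction xs with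
  | nil =>
    intro r bo hr
    simp only [List.reverse_nil, List.foldl_nil, pvOz, pvCz, List.foldl_nil, Prod.mk.injEq]
    constructor <;> first | omega | ((simp only [max_def]; try split_ifs) <;> omega)
  | cons c t ih =>
    intro r bo hr
    have hON : 0 ≤ pvOz t := pvOz_nonneg t
    have hCN : 0 ≤ pvCz t := pvCz_nonneg t
    rw [List.reverse_cons, List.foldl_append, ih r bo hr]
    simp only [List.foldl_cons, List.foldl_nil]
    by_cases hc1 : c = '('
    · subst hc1
      have s0 : List.foldl pvLStep (0, 0, 0) ('(' :: t) = List.foldl pvLStep (1, 0, 0) t := by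
        simp [pvLStep]
      have e0 := pvLShift t 1 0 0 (by omega)
      have hO : pvOz ('(' :: t) = pvOz t + max (1 - pvCz t) 0 := by
        show (List.foldl pvLStep (0, 0, 0) ('(' :: t)).1 = _
        rw [s0, e0]
      have hC : pvCz ('(' :: t) = max (pvCz t - 1) 0 := by
        show (List.foldl pvLStep (0, 0, 0) ('(' :: t)).2.1 = _
        rw [s0, e0]; first | rfl | (dsimp only; first | rfl | omega | ((simp only [max_def]; try split_ifs) <;> omega))
      have rs : pvRStep (pvCz t + max (r - pvOz t) 0, bo + max (pvOz t - r) 0) '('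
          = (if pvCz t + max (r - pvOz t) 0 > 0
             then (pvCz t + max (r - pvOz t) 0 - 1, bo + max (pvOz t - r) 0)
             else (pvCz t + max (r - pvOz t) 0, bo + max (pvOz t - r) 0 + 1)) := by
        simp [pvRStep]
      rw [rs, hO, hC]
      clear rs s0 e0 hO hC
      generalize pvOz t = O at hON ⊢
      generalize pvCz t = C at hCN ⊢
      split_ifs with hp
      · simp only [Prod.mk.injEq]
        constructor <;> first | omega | ((simp only [max_def]; try split_ifs) <;> omega)
      · simp only [Prod.mk.injEq]
        constructor <;> first | omega | ((simp only [max_def]; try split_ifs) <;> omega)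
    · by_cases hc2 : c = ')'
      · subst hc2
        have s0 : List.foldl pvLStep (0, 0, 0) (')' :: t) = List.foldl pvLStep (0, 1, 0) t := by
          simp [pvLStep]
        have e0 := pvLShift t 0 1 0 (le_refl 0)
        have hO : pvOz (')' :: t) = pvOz t := by
          show (List.foldl pvLStep (0, 0, 0) (')' :: t)).1 = _
          rw [s0, e0]; first | rfl | (dsimp only; first | rfl | omega | ((simp only [max_def]; try split_ifs) <;> omega))
        have hC : pvCz (')' :: t) = pvCz t + 1 := by
          show (List.foldl pvLStep (0, 0, 0) (')' :: t)).2.1 = _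
          rw [s0, e0]; first | rfl | (dsimp only; first | rfl | omega | ((simp only [max_def]; try split_ifs) <;> omega))
        have rs : pvRStep (pvCz t + max (r - pvOz t) 0, bo + max (pvOz t - r) 0) ')'
            = (pvCz t + max (r - pvOz t) 0 + 1, bo + max (pvOz t - r) 0) := by
          simp [pvRStep]
        rw [rs, hO, hC]
        clear rs s0 e0 hO hC
        generalize pvOz t = O at hON ⊢
        generalize pvCz t = C at hCN ⊢
        simp only [Prod.mk.injEq]
        constructor <;> first | omega | ((simp only [max_def]; try split_ifs) <;> omega)
      · have s0 : List.foldl pvLStep (0, 0, 0) (c :: t) = List.foldl pvLStep (0, 0, 1) t := by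
          simp [pvLStep, hc1, hc2]
        have e0 := pvLShift t 0 0 1 (le_refl 0)
        have hO : pvOz (c :: t) = pvOz t := by
          show (List.foldl pvLStep (0, 0, 0) (c :: t)).1 = _
          rw [s0, e0]; first | rfl | (dsimp only; first | rfl | omega | ((simp only [max_def]; try split_ifs) <;> omega))
        have hC : pvCz (c :: t) = pvCz t := by
          show (List.foldl pvLStep (0, 0, 0) (c :: t)).2.1 = _
          rw [s0, e0]; first | rfl | (dsimp only; first | rfl | omega | ((simp only [max_def]; try split_ifs) <;> omega))
        have rs : ∀ p : Int × Int, pvRStep p c = p := by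
          intro p; simp [pvRStep, hc1, hc2]
        rw [rs, hO, hC]

-- ===== VERDICT (by name: the statement is the Claim_ definition above) =====
theorem count_invalid_parenthesis_spec : Claim_equal_count_invalid_parenthesis := by
  intro s _
  unfold Spec_count_invalid_parenthesis
  show count_invalid_parenthesis s = count_invalid_parenthesis_alt s
  obtain ⟨h1, h2⟩ := pvAB s.toList 0 0 0 0 0 0 (by omega) (by omega)
  have hR := pvR s.toList 0 0 (le_refl 0)
  have hO := pvOz_nonneg s.toList
  simp only [pvOz, pvCz] at hR hO
  simp only [count_invalid_parenthesis, count_invalid_parenthesis_alt, hR]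
  simp only [max_def]
  split_ifs <;> omega
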